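-- pv_equiv track=rewrite | github.com/t-creates/AI-Log-Analyzer | backend/app/utils/parsers.py | _detect_txt_delimiter
-- ===== SOURCE A (Python) =====
-- from typing import Iterable, List, Optional, Sequence, Tuple
--
-- COMMON_DELIMITERS: Tuple[str, ...] = (",", "\t", "|", ";")
--
-- def _detect_txt_delimiter(line: str) -> Optional[str]:
--     """
--     Detect delimiter for a TXT line by choosing the delimiter that yields the best
--     4-part split when splitting into at most 4 fields.
--
--     Returns delimiter or None.
--     """
--     best_delim = None
--     best_score = -1
--
--     for d in COMMON_DELIMITERS:
--         parts = [p.strip() for p in line.split(d)]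
--         # Score: prefer exactly 4+ parts, and avoid very low part counts.
--         # We only really need 4 fields (timestamp/source/severity/message),
--         # but sometimes message contains the delimiter; we handle that by split(maxsplit=3) later.
--         score = 0
--         if len(parts) >= 4:
--             score += 2
--         if len(parts) >= 2:
--             score += 1
--         # If delimiter not present, len(parts)==1 => score stays low
--         if score > best_score:
--             best_score = score
--             best_delim = d
--
--     if best_score <= 0:
--         return None
--     return best_delim
-- ===== SOURCE B (Python) =====
-- from typing import Optional, Tuple
--
-- COMMON_DELIMITERS: Tuple[str, ...] = (",", "\t", "|", ";")
--
-- def _detect_txt_delimiter(line: str) -> Optional[str]: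
--     # Score 3 in A means line.count(d) >= 3 (>= 4 parts); score 1 means count >= 1.
--     # Two prioritized passes with early return replace the score accumulator.
--     for d in COMMON_DELIMITERS:
--         if line.count(d) >= 3:
--             return d
--     for d in COMMON_DELIMITERS:
--         if line.count(d) >= 1:
--             return d
--     return None
-- ===== Notes on version B (the rewrite author's own statement) =====
-- stated objective: simpler
-- what changed: Replaces the split/strip/best-score accumulator loop with two prioritized count-based passes returning the first delimiter occurring >= 3 times, else the first occurring at least once, else None.
import Mathlib
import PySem

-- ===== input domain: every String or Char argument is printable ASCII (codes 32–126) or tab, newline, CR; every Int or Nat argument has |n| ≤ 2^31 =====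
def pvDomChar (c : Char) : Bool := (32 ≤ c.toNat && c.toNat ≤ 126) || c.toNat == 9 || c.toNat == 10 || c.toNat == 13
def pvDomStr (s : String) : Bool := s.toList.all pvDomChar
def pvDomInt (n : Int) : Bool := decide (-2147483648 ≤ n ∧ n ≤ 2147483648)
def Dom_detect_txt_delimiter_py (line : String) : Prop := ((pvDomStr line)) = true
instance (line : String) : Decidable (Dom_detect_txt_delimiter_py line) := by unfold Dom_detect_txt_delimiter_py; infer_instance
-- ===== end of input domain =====

-- B replaces A's split/strip/best-score accumulator with two prioritized count-based passes (simpler; same cost).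


-- ===== PORT A =====
-- COMMON_DELIMITERS
def pvDelims : List String := [",", "\t", "|", ";"]

def detect_txt_delimiter_py (line : String) : Option String :=
  let r := pvDelims.foldl (fun (st : Option String × Int) d =>
      let parts := (PySem.Chars.splitOn line.toList d.toList).map PySem.Chars.strip
      let score : Int := 0
      let score := if 4 ≤ parts.length then score + 2 else score
      let score := if 2 ≤ parts.length then score + 1 else score
      if st.2 < score then (some d, score) else st)
    (none, -1)
  if r.2 ≤ 0 then none else r.1

-- ===== PORT B =====
def detect_txt_delimiter_py_alt (line : String) : Option String :=
  match pvDelims.find? (fun d => 3 ≤ PySem.Str.count line d) with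
  | some d => some d
  | none => pvDelims.find? (fun d => 1 ≤ PySem.Str.count line d)

-- ===== PRECONDITION & SPEC =====
def Spec_detect_txt_delimiter_py (line : String) (out : Option String) : Prop := out = detect_txt_delimiter_py_alt line
instance (line : String) (out : Option String) : Decidable (Spec_detect_txt_delimiter_py line out) := by unfold Spec_detect_txt_delimiter_py; infer_instance

-- ===== CLAIM (what is proved, stated in full; the proofs are below) =====
def Claim_equal_detect_txt_delimiter_py : Prop := ∀ (line : String), Dom_detect_txt_delimiter_py line → Spec_detect_txt_delimiter_py line (detect_txt_delimiter_py line)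

-- ===== LEMMAS AND PROOFS =====

-- count.go is insensitive to its accumulator (it only adds to it)
lemma count_go_acc (sep : List Char) (f : Nat) (l : List Char) (a : Nat) :
    PySem.Chars.count.go sep f l a = a + PySem.Chars.count.go sep f l 0 := by
  induction f generalizing l a with
  | zero => simp [PySem.Chars.count.go]
  | succ f ih =>
    cases l with
    | nil => simp [PySem.Chars.count.go]
    | cons c rest =>
      simp only [PySem.Chars.count.go]
      split
      · rw [ih _ (a + 1), ih _ 1]; omega
      · exact ih rest a

-- count.go is fuel-insensitive once fuel covers the list length
lemma count_go_fuel (sep : List Char) (hsep : sep ≠ []) (f g : Nat) (l : List Char) (a : Nat)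
    (hf : l.length ≤ f) (hg : l.length ≤ g) :
    PySem.Chars.count.go sep f l a = PySem.Chars.count.go sep g l a := by
  induction f generalizing g l a with
  | zero =>
    have : l = [] := by cases l <;> simp_all
    subst this; cases g <;> simp [PySem.Chars.count.go]
  | succ f ih =>
    cases l with
    | nil => cases g <;> simp [PySem.Chars.count.go]
    | cons c rest =>
      cases g with
      | zero => simp at hg
      | succ g =>
        simp only [PySem.Chars.count.go]
        split
        · rename_i hpre
          have hlen : sep.length ≤ (c :: rest).length := List.IsPrefix.length_le (List.isPrefixOf_iff_prefix.mp hpre)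
          have hs : 1 ≤ sep.length := by cases sep <;> simp_all
          exact ih g _ _ (by simp_all; omega) (by simp_all; omega)
        · exact ih g rest a (by simp_all) (by simp_all)

-- number of pieces splitOn.go produces = 1 + number of separator hits count.go finds
lemma splitOn_go_len (sep : List Char) (hsep : sep ≠ []) (f : Nat) (l cur : List Char)
    (acc : List (List Char)) (hf : l.length ≤ f) :
    (PySem.Chars.splitOn.go sep f l cur acc).length
      = acc.length + 1 + PySem.Chars.count.go sep f l 0 := by
  induction f generalizing l cur acc with
  | zero =>
    have : l = [] := by cases l <;> simp_all
    subst this; simp [PySem.Chars.splitOn.go, PySem.Chars.count.go]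
  | succ f ih =>
    cases l with
    | nil => simp [PySem.Chars.splitOn.go, PySem.Chars.count.go]
    | cons c rest =>
      simp only [PySem.Chars.splitOn.go, PySem.Chars.count.go]
      split
      · rename_i hpre
        have hlen : sep.length ≤ (c :: rest).length := List.IsPrefix.length_le (List.isPrefixOf_iff_prefix.mp hpre)
        have hs : 1 ≤ sep.length := by cases sep <;> simp_all
        rw [ih _ _ _ (by simp_all; omega),
            count_go_acc sep f (List.drop sep.length (c :: rest)) (0 + 1)]
        simp; omega
      · rw [ih rest _ _ (by simp_all)]

-- len(line.split(d)) = line.count(d) + 1 for a nonempty delimiter d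
lemma splitOn_len (s sep : List Char) (hsep : sep ≠ []) :
    (PySem.Chars.splitOn s sep).length = PySem.Chars.count s sep + 1 := by
  unfold PySem.Chars.splitOn PySem.Chars.count
  rw [splitOn_go_len sep hsep _ _ _ _ (by omega),
      count_go_fuel sep hsep (s.length + 1) s.length s 0 (by omega) (by omega)]
  simp [hsep, Nat.add_comm]

-- proof-only helpers: the fold step of A and the two-pass ite form of B, over abstract part counts
def pvStep (st : Option String × Int) (d : String) (n : Nat) : Option String × Int :=
  let score : Int := 0
  let score := if 4 ≤ n then score + 2 else score
  let score := if 2 ≤ n then score + 1 else score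
  if st.2 < score then (some d, score) else st

def pvA4 (n1 n2 n3 n4 : Nat) : Option String :=
  let r := pvStep (pvStep (pvStep (pvStep (none, -1) "," n1) "\t" n2) "|" n3) ";" n4
  if r.2 ≤ 0 then none else r.1

def pvB4 (n1 n2 n3 n4 : Nat) : Option String :=
  if 4 ≤ n1 then some "," else if 4 ≤ n2 then some "\t" else if 4 ≤ n3 then some "|" else if 4 ≤ n4 then some ";"
  else if 2 ≤ n1 then some "," else if 2 ≤ n2 then some "\t" else if 2 ≤ n3 then some "|" else if 2 ≤ n4 then some ";" else none

def pvScoreFn (n : Nat) : Int := if 2 ≤ n then (if 4 ≤ n then 0 + 2 else 0) + 1 else if 4 ≤ n then 0 + 2 else 0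

def pvSte (st : Option String × Int) (d : String) (s : Int) : Option String × Int :=
  if st.2 < s then (some d, s) else st

lemma score_cases (n : Nat) : pvScoreFn n = 0 ∨ pvScoreFn n = 1 ∨ pvScoreFn n = 3 := by
  unfold pvScoreFn; split_ifs <;> omega

lemma score3 (n : Nat) : pvScoreFn n = 3 ↔ 4 ≤ n := by
  unfold pvScoreFn; split_ifs <;> omega

lemma score1 (n : Nat) : 1 ≤ pvScoreFn n ↔ 2 ≤ n := by
  unfold pvScoreFn; split_ifs <;> omega

-- A's fold and B's two passes agree once scores are abstracted to their three possible values
lemma keyS (s1 s2 s3 s4 : Int) (h1 : s1 = 0 ∨ s1 = 1 ∨ s1 = 3) (h2 : s2 = 0 ∨ s2 = 1 ∨ s2 = 3)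
    (h3 : s3 = 0 ∨ s3 = 1 ∨ s3 = 3) (h4 : s4 = 0 ∨ s4 = 1 ∨ s4 = 3) :
    (let r := pvSte (pvSte (pvSte (pvSte (none, -1) "," s1) "\t" s2) "|" s3) ";" s4
     if r.2 ≤ 0 then none else r.1)
    = (if s1 = 3 then some "," else if s2 = 3 then some "\t" else if s3 = 3 then some "|" else if s4 = 3 then some ";"
       else if 1 ≤ s1 then some "," else if 1 ≤ s2 then some "\t" else if 1 ≤ s3 then some "|" else if 1 ≤ s4 then some ";" else none) := by
  rcases h1 with rfl | rfl | rfl <;> rcases h2 with rfl | rfl | rfl <;>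
  rcases h3 with rfl | rfl | rfl <;> rcases h4 with rfl | rfl | rfl <;> decide

lemma key (n1 n2 n3 n4 : Nat) : pvA4 n1 n2 n3 n4 = pvB4 n1 n2 n3 n4 := by
  have h : pvA4 n1 n2 n3 n4 =
      (let r := pvSte (pvSte (pvSte (pvSte (none, -1) "," (pvScoreFn n1)) "\t" (pvScoreFn n2)) "|" (pvScoreFn n3)) ";" (pvScoreFn n4)
       if r.2 ≤ 0 then none else r.1) := rfl
  rw [h, keyS _ _ _ _ (score_cases n1) (score_cases n2) (score_cases n3) (score_cases n4)]
  simp only [score3, score1]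
  rfl

-- find? on a cons as an ite (loop shape of B's early-return passes)
lemma find?_cons_ite {α : Type} (p : α → Bool) (a : α) (l : List α) :
    (a :: l).find? p = if p a then some a else l.find? p := by
  simp [List.find?]; split <;> simp_all

lemma A_eq (line : String) :
    detect_txt_delimiter_py line
      = pvA4 (PySem.Chars.count line.toList ",".toList + 1) (PySem.Chars.count line.toList "\t".toList + 1)
             (PySem.Chars.count line.toList "|".toList + 1) (PySem.Chars.count line.toList ";".toList + 1) := by
  simp only [detect_txt_delimiter_py, pvDelims, pvA4, pvStep, List.foldl, List.length_map,
    splitOn_len line.toList _ (by decide : ("," : String).toList ≠ []),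
    splitOn_len line.toList _ (by decide : ("\t" : String).toList ≠ []),
    splitOn_len line.toList _ (by decide : ("|" : String).toList ≠ []),
    splitOn_len line.toList _ (by decide : (";" : String).toList ≠ [])]

lemma B_eq (line : String) :
    detect_txt_delimiter_py_alt line
      = pvB4 (PySem.Chars.count line.toList ",".toList + 1) (PySem.Chars.count line.toList "\t".toList + 1)
             (PySem.Chars.count line.toList "|".toList + 1) (PySem.Chars.count line.toList ";".toList + 1) := by
  simp only [detect_txt_delimiter_py_alt, pvDelims, pvB4, PySem.Str.count,
    find?_cons_ite, List.find?_nil, decide_eq_true_eq]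
  simp only [show ∀ c : Nat, (4 ≤ c + 1) ↔ (3 ≤ c) from fun c => by omega,
             show ∀ c : Nat, (2 ≤ c + 1) ↔ (1 ≤ c) from fun c => by omega]
  split_ifs <;> rfl

-- ===== VERDICT (by name: the statement is the Claim_ definition above) =====
theorem detect_txt_delimiter_py_spec : Claim_equal_detect_txt_delimiter_py := by
  intro line _
  unfold Spec_detect_txt_delimiter_py
  rw [A_eq, B_eq, key]
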